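-- pv_equiv track=rewrite | github.com/XxtrauxX/repaso | Python-main/06 Matrices/SweetCO.py | diaMayIng
-- ===== SOURCE A (Python) =====
-- def diaMayIng(mat,lst):
--     lstIng=[]
--     for f in range(len(mat)):
--         suma=0
--         for c in range(len(mat[f])):
--             suma+=mat[f][c]*lst[c]
--         lstIng.append(suma)
--     mayor=max(lstIng)
--     dia=lstIng.index(mayor)+1
--     return [dia,mayor]
-- ===== SOURCE B (Python) =====
-- def diaMayIng(mat, lst):
--     best_i = best_v = None
--     for i, row in enumerate(mat):
--         s = sum(row[c] * lst[c] for c in range(len(row)))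
--         if best_v is None or s > best_v:
--             best_i, best_v = i, s
--     return [best_i + 1, best_v]
-- ===== Notes on version B (the rewrite author's own statement) =====
-- stated objective: simpler
-- what changed: Replaced build-a-full-list-of-sums then max() then .index() with a single fused pass that keeps a running best value and best index (strict > so the first maximal row wins, matching max().index()).
import Mathlib
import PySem

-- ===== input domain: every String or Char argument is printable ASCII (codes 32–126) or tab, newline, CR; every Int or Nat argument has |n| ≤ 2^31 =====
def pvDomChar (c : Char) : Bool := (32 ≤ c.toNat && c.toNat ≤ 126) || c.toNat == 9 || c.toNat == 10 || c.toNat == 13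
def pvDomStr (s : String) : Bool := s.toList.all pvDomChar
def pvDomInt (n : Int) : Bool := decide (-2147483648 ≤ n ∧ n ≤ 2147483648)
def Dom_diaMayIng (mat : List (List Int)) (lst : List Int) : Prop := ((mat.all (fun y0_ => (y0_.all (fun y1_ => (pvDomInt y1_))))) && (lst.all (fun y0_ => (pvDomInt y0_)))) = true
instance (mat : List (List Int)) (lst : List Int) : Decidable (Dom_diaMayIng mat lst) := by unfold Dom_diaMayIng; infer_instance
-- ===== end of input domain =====

-- B replaces A's build-all-sums / max() / .index() three-pass structure by one fused pass
-- keeping a running best value and index (simpler, single pass); return values agree on Pre_.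

-- ===== PORT A =====
-- List indexing uses getD: exact on Pre_ inputs, where every index Python touches is in range.
def diaMayIng (mat : List (List Int)) (lst : List Int) : List Int :=
  let lstIng := (List.range mat.length).foldl
    (fun acc f =>
      let row := mat.getD f []
      let suma := (List.range row.length).foldl
        (fun s c => s + row.getD c 0 * lst.getD c 0) 0
      acc ++ [suma]) []
  match PySem.List.max? lstIng (fun y => y) with
  | none => []          -- max([]) raises in Python: outside Pre_
  | some mayor =>
    match PySem.List.index? lstIng mayor with
    | none => []        -- unreachable: mayor ∈ lstIng
    | some dia => [(dia : Int) + 1, mayor]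

-- ===== PORT B =====
def diaMayIng_alt (mat : List (List Int)) (lst : List Int) : List Int :=
  let best := (PySem.List.enumerate mat).foldl
    (fun best p =>
      let s := (List.range p.2.length).foldl
        (fun acc c => acc + p.2.getD c 0 * lst.getD c 0) 0
      match best with
      | none => some (p.1, s)
      | some (bi, bv) => if s > bv then some (p.1, s) else some (bi, bv))
    none
  match best with
  | none => []          -- empty matrix: Python B raises there, outside Pre_
  | some (bi, bv) => [bi + 1, bv]

-- ===== PRECONDITION & SPEC =====
-- Pre_ excludes exactly the inputs where Python A raises: an empty matrix (max([]) is a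
-- ValueError) and any row longer than lst (lst[c] is an IndexError).
def Pre_diaMayIng (mat : List (List Int)) (lst : List Int) : Prop :=
  mat ≠ [] ∧ ∀ row ∈ mat, row.length ≤ lst.length
instance (mat : List (List Int)) (lst : List Int) : Decidable (Pre_diaMayIng mat lst) := by
  unfold Pre_diaMayIng; infer_instance
def pvWitness_diaMayIng : List (List Int) × List Int := ([[1, 2], [3, 0]], [5, 4])

def Spec_diaMayIng (mat : List (List Int)) (lst : List Int) (out : List Int) : Prop := out = diaMayIng_alt mat lst
instance (mat : List (List Int)) (lst : List Int) (out : List Int) : Decidable (Spec_diaMayIng mat lst out) := by unfold Spec_diaMayIng; infer_instance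

-- ===== CLAIM (what is proved, stated in full; the proofs are below) =====
def Claim_equal_diaMayIng : Prop := ∀ (mat : List (List Int)) (lst : List Int), Dom_diaMayIng mat lst → Pre_diaMayIng mat lst → Spec_diaMayIng mat lst (diaMayIng mat lst)

-- ===== LEMMAS AND PROOFS =====

-- weighted sum of one row (the inner loop both ports share)
def pvRowS (lst row : List Int) : Int :=
  (List.range row.length).foldl (fun s c => s + row.getD c 0 * lst.getD c 0) 0

-- B's running best, as a structural recursion over the list of row sums
def pvBest (k bi : Int) (bv : Int) : List Int → Int × Int
  | [] => (bi, bv)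
  | x :: xs => if x > bv then pvBest (k + 1) k x xs else pvBest (k + 1) bi bv xs

-- A's accumulator loop builds the map of row sums
lemma pv_foldl_append (g : Nat → Int) (l : List Nat) (init : List Int) :
    l.foldl (fun acc f => acc ++ [g f]) init = init ++ l.map g := by
  induction l generalizing init with
  | nil => simp
  | cons x xs ih => simp [List.foldl_cons, ih]

lemma pv_range_map_getD (S : List Int → Int) (mat : List (List Int)) :
    (List.range mat.length).map (fun f => S (mat.getD f [])) = mat.map S := by
  induction mat with
  | nil => simp
  | cons r rs ih =>
    rw [List.length_cons, List.range_succ_eq_map, List.map_cons, List.map_map]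
    simpa using ih

lemma pv_lstIng_eq (mat : List (List Int)) (lst : List Int) :
    (List.range mat.length).foldl
      (fun acc f =>
        let row := mat.getD f []
        let suma := (List.range row.length).foldl
          (fun s c => s + row.getD c 0 * lst.getD c 0) 0
        acc ++ [suma]) [] = mat.map (pvRowS lst) := by
  have := pv_foldl_append (fun f => pvRowS lst (mat.getD f [])) (List.range mat.length) []
  simpa [pvRowS] using this.trans
    (by rw [List.nil_append, pv_range_map_getD (pvRowS lst) mat])

-- B's foldl over enumerate equals pvBest on the list of row sums
lemma pv_fold_eq_best (lst : List Int) (rs : List (List Int)) :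
    ∀ (k bi : Int) (bv : Int),
    (PySem.List.enumerate rs k).foldl
      (fun best p =>
        let s := (List.range p.2.length).foldl
          (fun acc c => acc + p.2.getD c 0 * lst.getD c 0) 0
        match best with
        | none => some (p.1, s)
        | some (bi, bv) => if s > bv then some (p.1, s) else some (bi, bv))
      (some (bi, bv)) = some (pvBest k bi bv (rs.map (pvRowS lst))) := by
  induction rs with
  | nil => intro k bi bv; simp [PySem.List.enumerate_nil, pvBest]
  | cons r t ih =>
    intro k bi bv
    rw [PySem.List.enumerate_cons, List.foldl_cons, List.map_cons]
    show List.foldl _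
      (if pvRowS lst r > bv then some (k, pvRowS lst r) else some (bi, bv))
      (PySem.List.enumerate t (k + 1)) = _
    by_cases h : pvRowS lst r > bv
    · rw [if_pos h, ih (k + 1) k (pvRowS lst r)]
      simp only [pvBest]
      rw [if_pos h]
    · rw [if_neg h, ih (k + 1) bi bv]
      simp only [pvBest]
      rw [if_neg h]

-- the value component of pvBest is the running max
lemma pv_best_snd (t : List Int) : ∀ (k bi : Int) (bv : Int),
    (pvBest k bi bv t).2 = t.foldl max bv := by
  induction t with
  | nil => intro k bi bv; simp [pvBest]
  | cons x xs ih =>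
    intro k bi bv
    by_cases h : x > bv
    · simp only [pvBest]
      rw [if_pos h, ih, List.foldl_cons, max_eq_right h.le]
    · simp only [pvBest]
      rw [if_neg h, ih, List.foldl_cons, max_eq_left (not_lt.mp h)]

-- the invariant: (bi, bv) is the best of the prefix pre, and the fold extends it
lemma pv_best_index (t : List Int) : ∀ (pre : List Int) (bi : Nat) (bv : Int),
    (∀ y ∈ pre, y ≤ bv) → PySem.List.index? pre bv = some bi →
    PySem.List.index? (pre ++ t) (t.foldl max bv) = some ((pvBest (pre.length : Int) (bi : Int) bv t).1.toNat) ∧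
    ((pvBest (pre.length : Int) (bi : Int) bv t).1 : Int) = ((pvBest (pre.length : Int) (bi : Int) bv t).1.toNat : Int) := by
  induction t with
  | nil =>
    intro pre bi bv hle hidx
    simp only [List.append_nil, List.foldl_nil, pvBest, Int.toNat_natCast]
    exact ⟨hidx, trivial⟩
  | cons x xs ih =>
    intro pre bi bv hle hidx
    by_cases h : x > bv
    · have hnotmem : x ∉ pre := fun hm => absurd (hle x hm) (not_le.mpr h)
      have hidx' : PySem.List.index? (pre ++ [x]) x = some pre.length :=
        PySem.List.index?_append_singleton_self _ _ hnotmem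
      have hle' : ∀ y ∈ pre ++ [x], y ≤ x := by
        intro y hy
        rcases List.mem_append.mp hy with hy | hy
        · exact (hle y hy).trans h.le
        · simp_all
      have := ih (pre ++ [x]) pre.length x hle' hidx'
      simp only [pvBest]
      rw [if_pos h, List.foldl_cons, max_eq_right h.le]
      simpa using this
    · have hmem : bv ∈ pre := by
        obtain ⟨hk, hEq, -⟩ := PySem.List.getElem_of_index?_eq_some hidx
        exact hEq ▸ List.getElem_mem hk
      have hidx' : PySem.List.index? (pre ++ [x]) bv = some bi := by
        rw [PySem.List.index?_append_of_mem _ hmem, hidx]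
      have hle' : ∀ y ∈ pre ++ [x], y ≤ bv := by
        intro y hy
        rcases List.mem_append.mp hy with hy | hy
        · exact hle y hy
        · simp_all [not_lt.mp h]
      have := ih (pre ++ [x]) bi bv hle' hidx'
      simp only [pvBest]
      rw [if_neg h, List.foldl_cons, max_eq_left (not_lt.mp h)]
      simpa using this

-- ===== VERDICT (by name: the statement is the Claim_ definition above) =====
theorem diaMayIng_spec : Claim_equal_diaMayIng := by
  intro mat lst _ hpre
  unfold Spec_diaMayIng
  simp only [diaMayIng, diaMayIng_alt]
  obtain ⟨hne, -⟩ := hpre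
  obtain ⟨r, rs, rfl⟩ := List.exists_cons_of_ne_nil hne
  rw [pv_lstIng_eq, PySem.List.enumerate_cons, List.foldl_cons, List.map_cons,
    PySem.List.max?_id_cons]
  have hfold := pv_fold_eq_best lst rs 1 0 (pvRowS lst r)
  obtain ⟨hidx, hcast⟩ := pv_best_index (rs.map (pvRowS lst)) [pvRowS lst r] 0 (pvRowS lst r)
    (by simp) (PySem.List.index?_cons_self _ _)
  have hv := pv_best_snd (rs.map (pvRowS lst)) 1 0 (pvRowS lst r)
  simp only [List.length_cons, List.length_nil, List.singleton_append, Nat.cast_zero,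
    Nat.cast_one, Nat.zero_add] at hidx hcast
  show _ = match List.foldl
      (fun best p =>
        match best with
        | none => some (p.1, List.foldl (fun acc c => acc + p.2.getD c 0 * lst.getD c 0) 0 (List.range p.2.length))
        | some (bi, bv) =>
          if List.foldl (fun acc c => acc + p.2.getD c 0 * lst.getD c 0) 0 (List.range p.2.length) > bv then
            some (p.1, List.foldl (fun acc c => acc + p.2.getD c 0 * lst.getD c 0) 0 (List.range p.2.length))
          else some (bi, bv))
      (some ((0 : Int), pvRowS lst r))
      (PySem.List.enumerate rs 1) with
    | none => ([] : List Int)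
    | some (bi, bv) => [bi + 1, bv]
  rcases hp : pvBest 1 0 (pvRowS lst r) (List.map (pvRowS lst) rs) with ⟨bi, bv⟩
  rw [hp] at hfold hidx hcast hv
  rw [hfold, ← hv]
  rw [← hv] at hidx
  rw [PySem.List.index?_eq_idxOf?] at hidx
  simp [hidx, ← hcast]
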